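-- pv_equiv track=rewrite | github.com/sumithastir/Data-structure | day7-special-index.py | pfeven
-- ===== SOURCE A (Python) =====
-- def pfeven(A):
--     peven = [A[0]]
--     N = len(A)
--     for i in range(1, N):
--         if (i % 2 == 0):
--             peven.append(peven[i - 1] + A[i])
--         else:
--             peven.append(peven[i - 1])
--     return peven
-- ===== SOURCE B (Python) =====
-- def pfeven(A):
--     evens = A[::2]
--     sums = []
--     t = 0
--     for x in evens:
--         t += x
--         sums.append(t)
--     out = [w for v in sums for w in (v, v)]
--     return out[:len(A)]
-- ===== Notes on version B (the rewrite author's own statement) =====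
-- stated objective: alternative
-- what changed: Instead of A's per-index loop that branches on parity and reads back into its own output list, B slices out the even-indexed elements with A[::2], prefix-sums that half-length list, duplicates each partial sum, and trims the expanded list to len(A).
import Mathlib
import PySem

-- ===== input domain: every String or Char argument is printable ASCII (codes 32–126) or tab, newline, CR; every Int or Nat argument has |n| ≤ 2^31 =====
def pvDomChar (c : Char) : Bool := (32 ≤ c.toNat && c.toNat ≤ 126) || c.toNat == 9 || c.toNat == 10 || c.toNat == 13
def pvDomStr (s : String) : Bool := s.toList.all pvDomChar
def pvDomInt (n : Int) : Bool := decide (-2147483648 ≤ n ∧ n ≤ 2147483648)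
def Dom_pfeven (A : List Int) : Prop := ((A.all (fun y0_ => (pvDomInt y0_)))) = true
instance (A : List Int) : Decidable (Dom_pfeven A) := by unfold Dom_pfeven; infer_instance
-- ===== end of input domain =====

-- B replaces A's per-index parity-branching loop (which reads back into its own output list) by a stride decomposition: slice out A[::2], prefix-sum that half-length list, duplicate each partial sum and trim to len(A); on the empty list A raises IndexError while B returns [] (excluded by Pre_).


-- ===== PORT A =====
def pfeven (A : List Int) : List Int :=
  match PySem.List.pyGet? A 0 with
  | none => []      -- indexing the first element raises IndexError here; outside Pre_
  | some a0 =>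
    (PySem.List.pyRange 1 (A.length : Int) 1).foldl
      (fun peven i =>
        if PySem.Int.mod i 2 == 0 then
          peven ++ [PySem.List.pyGetD peven (i - 1) 0 + PySem.List.pyGetD A i 0]
        else
          peven ++ [PySem.List.pyGetD peven (i - 1) 0])
      [a0]

-- ===== PORT B =====
-- the 'for x in evens: t += x; sums.append(t)' prefix-sum loop of Source B
def pfevenScan (total : Int) : List Int → List Int
  | [] => []
  | m :: ms => (total + m) :: pfevenScan (total + m) ms

def pfeven_alt (A : List Int) : List Int :=
  let evens := (PySem.List.slice? A none none 2).getD []   -- A[::2]; step is the literal 2 ≠ 0, so never none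
  let sums := pfevenScan 0 evens
  let out := sums.flatMap (fun v => [v, v])                -- [w for v in sums for w in (v, v)]
  PySem.List.slice out none (some (A.length : Int))   -- out[:len(A)]

-- ===== PRECONDITION & SPEC =====
-- Pre_ excludes only the empty list, on which A raises IndexError indexing its first element.
def Pre_pfeven (A : List Int) : Prop := A ≠ []
instance (A : List Int) : Decidable (Pre_pfeven A) := by unfold Pre_pfeven; infer_instance
def pvWitness_pfeven : List Int := ([1, 2, 3, 4])

def Spec_pfeven (A : List Int) (out : List Int) : Prop := out = pfeven_alt A
instance (A : List Int) (out : List Int) : Decidable (Spec_pfeven A out) := by unfold Spec_pfeven; infer_instance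

-- ===== CLAIM (what is proved, stated in full; the proofs are below) =====
def Claim_equal_pfeven : Prop := ∀ (A : List Int), Dom_pfeven A → Pre_pfeven A → Spec_pfeven A (pfeven A)

-- ===== LEMMAS AND PROOFS =====

-- reference form of A[::2]: every second element starting at index 0
def stride2 : List Int → List Int
  | [] => []
  | [a] => [a]
  | a :: _ :: ys => a :: stride2 ys

theorem filterMap_range_eq_stride2 (xs : List Int) :
    List.filterMap (fun k => xs[2 * k]?) (List.range ((xs.length + 1) / 2)) = stride2 xs := by
  induction xs using stride2.induct with
  | case1 => simp [stride2]
  | case2 a => simp [stride2]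
  | case3 a b ys ih =>
      have hc : ((a :: b :: ys).length + 1) / 2 = (ys.length + 1) / 2 + 1 := by
        simp [List.length_cons]; omega
      rw [hc, List.range_succ_eq_map, List.filterMap_cons, List.filterMap_map]
      have h0 : (a :: b :: ys)[2 * 0]? = some a := by simp
      rw [h0]
      have hf : (fun k => (a :: b :: ys)[2 * k]?) ∘ Nat.succ = fun k => ys[2 * k]? := by
        funext k
        have : 2 * Nat.succ k = 2 * k + 1 + 1 := by omega
        simp [Function.comp, this]
      rw [hf, ih]
      rfl

theorem slice?_step2_eq_stride2 (xs : List Int) :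
    PySem.List.slice? xs none none 2 = some (stride2 xs) := by
  rw [← filterMap_range_eq_stride2]
  simp only [PySem.List.slice?, PySem.List.sliceIndices]
  norm_num
  have hcount : (if 0 < xs.length then (((xs.length : Int) + 2 - 1) / 2).toNat else 0)
      = (xs.length + 1) / 2 := by
    split_ifs with h <;> omega
  rw [hcount]
  exact List.filterMap_congr (fun k _ => by congr 1)

-- positional reference mask: msk s A = [A[k] if (s+k) even else 0]
def msk (s : Nat) : List Int → List Int
  | [] => []
  | x :: xs => (if s % 2 == 0 then x else 0) :: msk (s + 1) xs

theorem msk_length (s : Nat) (l : List Int) : (msk s l).length = l.length := by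
  induction l generalizing s with
  | nil => rfl
  | cons x xs ih => simp [msk, ih]

theorem msk_append_singleton (s : Nat) (l : List Int) (x : Int) :
    msk s (l ++ [x]) = msk s l ++ [if (s + l.length) % 2 == 0 then x else 0] := by
  induction l generalizing s with
  | nil => simp [msk]
  | cons y ys ih =>
      simp only [List.cons_append, msk, ih (s + 1), List.length_cons]
      have h : s + 1 + ys.length = s + (ys.length + 1) := by ring
      rw [h]
      rfl

theorem msk_add_two (s : Nat) (l : List Int) : msk (s + 2) l = msk s l := by
  induction l generalizing s with
  | nil => rfl
  | cons x xs ih =>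
      have h : (s + 2) % 2 = s % 2 := by omega
      simp only [msk, h]
      rw [show s + 2 + 1 = s + 1 + 2 by ring, ih (s + 1)]

theorem pfevenScan_append_singleton (t : Int) (l : List Int) (x : Int) :
    pfevenScan t (l ++ [x]) = pfevenScan t l ++ [t + l.sum + x] := by
  induction l generalizing t with
  | nil => simp [pfevenScan]
  | cons y ys ih => simp [pfevenScan, ih]; ring_nf

theorem pfevenScan_getD_last (t : Int) (l : List Int) (h : l ≠ []) :
    (pfevenScan t l).getD (l.length - 1) 0 = t + l.sum := by
  induction l generalizing t with
  | nil => exact absurd rfl h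
  | cons y ys ih =>
      cases ys with
      | nil => simp [pfevenScan]
      | cons z zs =>
          have := ih (t + y) (by simp)
          simpa [pfevenScan, List.sum_cons, add_assoc] using this

-- loop invariant of A: after processing range(1, n) the list is the scan of msk 0 (A.take n)
theorem pfeven_loop_inv (A : List Int) (hA : A ≠ []) (n : Nat) (h1 : 1 ≤ n) (hn : n ≤ A.length) :
    (PySem.List.pyRange 1 (n : Int) 1).foldl
      (fun peven i =>
        if PySem.Int.mod i 2 == 0 then
          peven ++ [PySem.List.pyGetD peven (i - 1) 0 + PySem.List.pyGetD A i 0]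
        else
          peven ++ [PySem.List.pyGetD peven (i - 1) 0])
      [A.getD 0 0]
    = pfevenScan 0 (msk 0 (A.take n)) := by
  induction n with
  | zero => omega
  | succ m ih =>
      by_cases hm : 1 ≤ m
      · -- step case
        have hrng : PySem.List.pyRange 1 ((m + 1 : Nat) : Int) 1
            = PySem.List.pyRange 1 (m : Int) 1 ++ [(m : Int)] := by
          have := PySem.List.pyRange_one_succ_right
            (by exact_mod_cast hm : (1 : Int) ≤ (m : Int))
          simpa [Nat.cast_add, Nat.cast_one] using this
        rw [hrng, List.foldl_append, ih hm (by omega)]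
        have hmlt : m < A.length := by omega
        have htake : A.take (m + 1) = A.take m ++ [A[m]] := by
          rw [List.take_add_one]; simp [List.getElem?_eq_getElem hmlt]
        have hlen : (msk 0 (A.take m)).length = m := by
          rw [msk_length, List.length_take]; omega
        have hne : msk 0 (A.take m) ≠ [] := by
          intro h; rw [← List.length_eq_zero_iff, hlen] at *; omega
        have hlast : PySem.List.pyGetD (pfevenScan 0 (msk 0 (A.take m))) ((m : Int) - 1) 0
            = (msk 0 (A.take m)).sum := by
          have hc : ((m : Int) - 1) = ((m - 1 : Nat) : Int) := by omega
          rw [hc, PySem.List.pyGetD_natCast]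
          have := pfevenScan_getD_last 0 (msk 0 (A.take m)) hne
          rw [hlen] at this
          simpa using this
        have hAm : PySem.List.pyGetD A (m : Int) 0 = A[m] := by
          rw [PySem.List.pyGetD_natCast]
          simp [List.getD, List.getElem?_eq_getElem hmlt]
        have hmod : PySem.Int.mod (m : Int) 2 = ((m % 2 : Nat) : Int) := by
          exact_mod_cast PySem.Int.mod_natCast m 2
        have hmsum : msk 0 (A.take (m + 1))
            = msk 0 (A.take m) ++ [if m % 2 == 0 then A[m] else 0] := by
          rw [htake, msk_append_singleton]
          congr 1
          simp [List.length_take, Nat.min_eq_left (le_of_lt hmlt)]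
        rw [hmsum, pfevenScan_append_singleton]
        simp only [List.foldl_cons, List.foldl_nil, hmod, hlast, hAm, zero_add]
        by_cases hpar : m % 2 = 0
        · have ht : (((m % 2 : Nat) : Int) == 0) = true := by rw [hpar]; rfl
          have ht2 : (m % 2 == 0) = true := by rw [hpar]; rfl
          rw [ht, ht2]; simp
        · have ht : (((m % 2 : Nat) : Int) == 0) = false :=
            beq_eq_false_iff_ne.mpr (by omega)
          have ht2 : (m % 2 == 0) = false := beq_eq_false_iff_ne.mpr hpar
          rw [ht, ht2]; simp
      · -- base case n = 1
        have hm0 : m = 0 := by omega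
        subst hm0
        cases A with
        | nil => exact absurd rfl hA
        | cons a as =>
            simp [PySem.List.pyRange_one_eq_nil (by norm_num : (1:Int) ≤ 1), msk, pfevenScan]

-- B's expand-and-trim of the half-length prefix sums equals the masked scan A computes
theorem dup_stride2_eq_scan_msk (l : List Int) (t : Int) :
    ((pfevenScan t (stride2 l)).flatMap (fun v => [v, v])).take l.length
      = pfevenScan t (msk 0 l) := by
  induction l using stride2.induct generalizing t with
  | case1 => simp [stride2, msk, pfevenScan]
  | case2 a => simp [stride2, msk, pfevenScan]
  | case3 a b ys ih =>
      have h2 : msk 0 (a :: b :: ys) = a :: 0 :: msk 0 ys := by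
        simp only [msk]
        rw [show (0 : Nat) + 1 + 1 = 0 + 2 by ring, msk_add_two]
        rfl
      rw [h2]
      simp only [stride2, pfevenScan, List.flatMap_cons, List.length_cons]
      simp only [List.cons_append, List.nil_append, List.take_succ_cons, add_zero]
      rw [ih (t + a)]

-- ===== VERDICT (by name: the statement is the Claim_ definition above) =====
theorem pfeven_spec : Claim_equal_pfeven := by
  intro A _ hpre
  unfold Spec_pfeven
  cases A with
  | nil => exact absurd rfl hpre
  | cons a as =>
      have hget : PySem.List.pyGet? (a :: as) (0 : Int) = some a := by
        simp [PySem.List.pyGet?, PySem.List.pyIdx?]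
      have hlen : 1 ≤ (a :: as).length := by simp
      have hinv := pfeven_loop_inv (a :: as) (by simp) (a :: as).length hlen le_rfl
      have halt : pfeven_alt (a :: as)
          = ((pfevenScan 0 (stride2 (a :: as))).flatMap (fun v => [v, v])).take (a :: as).length := by
        simp only [pfeven_alt, slice?_step2_eq_stride2, Option.getD_some]
        rw [PySem.List.slice_to_natCast]
        
      rw [halt, dup_stride2_eq_scan_msk]
      simp only [pfeven, hget]
      simpa [List.take_length, List.getD] using hinv
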